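-- pv_equiv track=rewrite | github.com/axeleratio/CurlySMILESpy | csm_notation.py | splitOffRightEndCurly
-- ===== SOURCE A (Python) =====
-- def splitOffRightEndCurly(sStr):
--    sRemainder  = None # substring of sStr preceding right-end curly
--    sEndCurly   = None # content of curly at right end of sStr
--    nLen = len(sStr)
--    if sStr[nLen-1] == '}':
--
--       # starting at right end of sStr, find nearest '{' to the left,
--       # but skip nested pairs of curly braces
--       iPos = nLen-2
--       nNestingDepth = 1
--       while iPos >= 0:
--          if sStr[iPos] == '}':
--             nNestingDepth += 1
--          elif sStr[iPos] == '{':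
--             nNestingDepth -= 1
--          if nNestingDepth == 0:
--             break
--          iPos -= 1
--
--       if iPos > 0: # end curly cannot start at position 0
--          sRemainder  = sStr[0:iPos]
--          sEndCurly   = sStr[iPos+1:nLen-1]
--    return (sRemainder,sEndCurly)
-- ===== SOURCE B (Python) =====
-- def splitOffRightEndCurly(sStr):
--     # forward scan with a stack of '{' indices instead of a backward depth count
--     if not sStr.endswith('}'):
--         return (None, None)
--     stack = []
--     for i, c in enumerate(sStr[:-1]):
--         if c == '{':
--             stack.append(i)
--         elif c == '}' and stack:
--             stack.pop()
--     if stack and stack[-1] > 0: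
--         iPos = stack[-1]
--         return (sStr[:iPos], sStr[iPos + 1:-1])
--     return (None, None)
-- ===== Notes on version B (the rewrite author's own statement) =====
-- stated objective: idiomatic
-- what changed: Replaces the backward depth-counting while-loop with a single forward pass keeping a stack of open-brace indices (top of stack after the prefix is the matching open brace), guarded by an endswith check; on the empty string A raises IndexError (excluded by Pre_) while B returns (None, None).
import Mathlib
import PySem

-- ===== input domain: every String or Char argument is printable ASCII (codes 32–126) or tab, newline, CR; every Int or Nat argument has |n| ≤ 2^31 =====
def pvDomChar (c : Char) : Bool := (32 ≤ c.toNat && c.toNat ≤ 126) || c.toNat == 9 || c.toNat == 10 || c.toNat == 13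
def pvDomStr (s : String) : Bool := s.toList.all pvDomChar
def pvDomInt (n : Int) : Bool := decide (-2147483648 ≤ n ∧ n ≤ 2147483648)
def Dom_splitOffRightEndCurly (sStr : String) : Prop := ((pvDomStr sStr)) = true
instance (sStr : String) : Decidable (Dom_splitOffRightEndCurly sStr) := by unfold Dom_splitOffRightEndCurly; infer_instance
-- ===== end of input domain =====

-- B replaces A's backward depth-counting while-loop by a forward pass with a stack of open-brace indices (idiomatic bracket matching); return values agree on every non-empty string.

-- ===== PORT A =====
-- A's while-loop: iPos walks down from nLen-2 with a nesting depth; the index read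
-- sStr[iPos] always has 0 ≤ iPos < len in Python, so getD is exact here.
def pvLoopA (l : List Char) (iPos : Int) (depth : Int) : Int :=
  if h : 0 ≤ iPos then
    let c := l.getD iPos.toNat ' '
    let depth' := if c = '}' then depth + 1 else if c = '{' then depth - 1 else depth
    if depth' = 0 then iPos else pvLoopA l (iPos - 1) depth'
  else iPos
termination_by (iPos + 1).toNat
decreasing_by omega

def splitOffRightEndCurly (sStr : String) : Option String × Option String :=
  let l := sStr.toList
  let nLen : Int := l.length
  match PySem.List.pyGet? l (nLen - 1) with
  | none => (none, none)  -- Python raises IndexError here (empty string); excluded by Pre_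
  | some c =>
    if c = '}' then
      let iPos := pvLoopA l (nLen - 2) 1
      if iPos > 0 then
        (some (String.ofList (PySem.List.slice l (some 0) (some iPos))),
         some (String.ofList (PySem.List.slice l (some (iPos + 1)) (some (nLen - 1)))))
      else (none, none)
    else (none, none)

-- ===== PORT B =====
-- Source B's for-loop over enumerate(sStr[:-1]); the stack top is the list head here
-- (Python appends/pops/reads at the right end — same stack, mirrored).
def pvLoopB (cs : List Char) (i : Int) (stack : List Int) : List Int :=
  match cs with
  | [] => stack
  | c :: rest =>
      pvLoopB rest (i + 1)
        (if c = '{' then i :: stack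
         else if c = '}' ∧ stack ≠ [] then stack.tail
         else stack)

def splitOffRightEndCurly_alt (sStr : String) : Option String × Option String :=
  let l := sStr.toList
  if PySem.Str.endswith sStr "}" then
    match pvLoopB l.dropLast 0 [] with
    | iPos :: _ =>
        if iPos > 0 then
          (some (String.ofList (PySem.List.slice l none (some iPos))),
           some (String.ofList (PySem.List.slice l (some (iPos + 1)) (some (-1)))))
        else (none, none)
    | [] => (none, none)
  else (none, none)

-- ===== PRECONDITION & SPEC =====
-- Pre_ excludes only the empty string, on which Python A raises IndexError.
def Pre_splitOffRightEndCurly (sStr : String) : Prop := sStr ≠ ""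
instance (sStr : String) : Decidable (Pre_splitOffRightEndCurly sStr) := by unfold Pre_splitOffRightEndCurly; infer_instance
def pvWitness_splitOffRightEndCurly : String := "a{b}"

def Spec_splitOffRightEndCurly (sStr : String) (out : Option String × Option String) : Prop := out = splitOffRightEndCurly_alt sStr
instance (sStr : String) (out : Option String × Option String) : Decidable (Spec_splitOffRightEndCurly sStr out) := by unfold Spec_splitOffRightEndCurly; infer_instance

-- ===== CLAIM (what is proved, stated in full; the proofs are below) =====
def Claim_equal_splitOffRightEndCurly : Prop := ∀ (sStr : String), Dom_splitOffRightEndCurly sStr → Pre_splitOffRightEndCurly sStr → Spec_splitOffRightEndCurly sStr (splitOffRightEndCurly sStr)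
-- ===== LEMMAS AND PROOFS =====

-- pvLoopB over a concatenation processes the two parts in order.
lemma pvLoopB_append (xs ys : List Char) (i : Int) (st : List Int) :
    pvLoopB (xs ++ ys) i st = pvLoopB ys (i + xs.length) (pvLoopB xs i st) := by
  induction xs generalizing i st with
  | nil => simp [pvLoopB]
  | cons c rest ih =>
      simp only [List.cons_append, pvLoopB, ih, List.length_cons]
      congr 1
      push_cast
      ring

-- The invariant: A's backward scan from position k-1 at nesting depth d returns the
-- d-th element (from the top) of B's forward stack over the first k characters,
-- or -1 when that stack is shorter than d.
lemma pvLoopA_eq_stack (l : List Char) (k : Nat) (hk : k ≤ l.length) :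
    ∀ d : Int, 1 ≤ d →
      pvLoopA l ((k : Int) - 1) d = (pvLoopB (l.take k) 0 []).getD (d - 1).toNat (-1) := by
  induction k with
  | zero =>
      intro d hd
      rw [pvLoopA.eq_def]
      norm_num [pvLoopB]
  | succ k ih =>
      intro d hd
      have hk' : k ≤ l.length := Nat.le_of_succ_le hk
      have hklt : k < l.length := hk
      have htake : l.take (k + 1) = l.take k ++ [l[k]] := by
        rw [List.take_add_one]
        simp [List.getElem?_eq_getElem hklt]
      have hlen : (l.take k).length = k := List.length_take_of_le hk'
      have hstep : pvLoopB (l.take (k + 1)) 0 [] =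
          (if l[k] = '{' then (k : Int) :: pvLoopB (l.take k) 0 []
           else if l[k] = '}' ∧ pvLoopB (l.take k) 0 [] ≠ [] then (pvLoopB (l.take k) 0 []).tail
           else pvLoopB (l.take k) 0 []) := by
        rw [htake, pvLoopB_append, hlen]
        simp [pvLoopB]
      have hcast : ((k + 1 : Nat) : Int) - 1 = (k : Int) := by push_cast; ring
      have h0 : (0 : Int) ≤ (k : Int) := Int.natCast_nonneg k
      have hgetD : l.getD ((k : Int)).toNat ' ' = l[k] := by
        simp [List.getD, List.getElem?_eq_getElem hklt]
      rw [hcast, pvLoopA.eq_def, dif_pos h0, hstep]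
      simp only [hgetD]
      by_cases hbr : l[k] = '}'
      · -- '}' : depth increases on A's side, pop on B's side
        have hd1 : d + 1 ≠ 0 := by omega
        simp only [hbr]
        simp only [reduceIte, Char.reduceEq, if_neg hd1, ne_eq, true_and]
        rw [show ((k : Int) - 1) = ((k : Nat) : Int) - 1 from rfl, ih hk' (d + 1) (by omega)]
        cases hst : pvLoopB (l.take k) 0 [] with
        | nil => simp
        | cons x t =>
            simp only [List.getD]
            rw [show (d + 1 - 1).toNat = d.toNat - 1 + 1 from by omega,
                show (d - 1).toNat = d.toNat - 1 from by omega]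
            simp
      · by_cases hbo : l[k] = '{'
        · -- '{' : depth decreases on A's side, push on B's side
          by_cases hd1 : d = 1
          · subst hd1
            simp only [hbo, Char.reduceEq, reduceIte]
            norm_num
          · have hne0 : d - 1 ≠ 0 := by omega
            simp only [hbo]
            simp only [reduceIte, Char.reduceEq, if_neg hne0]
            rw [show ((k : Int) - 1) = ((k : Nat) : Int) - 1 from rfl, ih hk' (d - 1) (by omega)]
            simp only [List.getD]
            rw [show (d - 1).toNat = (d - 1 - 1).toNat + 1 from by omega]
            simp
        · -- neither brace: depth and stack unchanged
          have hne0 : d ≠ 0 := by omega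
          simp only [hbr, hbo, hne0, if_false, false_and]
          exact ih hk' d hd

-- a[iPos+1 : len-1] and a[iPos+1 : -1] are the same slice.
lemma slice_len_sub_one (l : List Char) (a : Int) (hl : l ≠ []) :
    PySem.List.slice l (some a) (some ((l.length : Int) - 1)) =
      PySem.List.slice l (some a) (some (-1)) := by
  have h1 : ((l.length : Int) - 1) = ((l.length - 1 : Nat) : Int) := by
    have : 1 ≤ l.length := List.length_pos_iff.mpr hl
    omega
  simp [PySem.List.slice, h1]

-- endswith '}' on xs ++ [c] means c = '}'.
lemma endswith_concat (xs : List Char) (c : Char) :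
    (['}'] <:+ (xs ++ [c])) ↔ c = '}' := by
  constructor
  · rintro ⟨t, ht⟩
    have := congrArg List.getLast? ht
    simpa using this.symm
  · rintro rfl; exact ⟨xs, rfl⟩

-- ===== VERDICT (by name: the statement is the Claim_ definition above) =====
theorem splitOffRightEndCurly_spec : Claim_equal_splitOffRightEndCurly := by
  intro sStr _ hpre
  have hl : sStr.toList ≠ [] := fun h => hpre (String.toList_eq_nil_iff.mp h)
  obtain ⟨xs, c, hsl⟩ : ∃ xs c, sStr.toList = xs ++ [c] := by
    rcases List.eq_nil_or_concat sStr.toList with h | ⟨xs, c, h⟩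
    · exact absurd h hl
    · exact ⟨xs, c, by simpa [List.concat_eq_append] using h⟩
  have hend : (PySem.Str.endswith sStr "}" = true) ↔ c = '}' := by
    rw [PySem.Str.endswith_eq, PySem.Chars.endswith_iff, hsl]
    exact endswith_concat xs c
  have hget : PySem.List.pyGet? sStr.toList ((sStr.toList.length : Int) - 1) = some c := by
    rw [hsl]
    have h1 : (((xs ++ [c]).length : Nat) : Int) - 1 = (xs.length : Int) := by
      simp
    rw [h1, show xs ++ [c] = xs ++ c :: [] from rfl,
        show (xs.length : Int) = ((xs.length : Nat) : Int) from rfl]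
    exact PySem.List.pyGet?_append_length xs [] c
  unfold Spec_splitOffRightEndCurly splitOffRightEndCurly splitOffRightEndCurly_alt
  simp only [hget]
  by_cases hc : c = '}'
  · have hendT : PySem.Str.endswith sStr "}" = true := hend.mpr hc
    simp only [hc, hendT, if_true]
    -- the two loops compute the same matching position
    have hxs : sStr.toList.dropLast = xs := by rw [hsl]; simp
    have hkle : xs.length ≤ sStr.toList.length := by rw [hsl]; simp
    have htk : sStr.toList.take xs.length = xs := by rw [hsl]; exact List.take_left
    have harith : ((sStr.toList.length : Nat) : Int) - 2 = (xs.length : Int) - 1 := by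
      rw [hsl]; simp; ring
    have hmain : pvLoopA sStr.toList ((sStr.toList.length : Int) - 2) 1
        = (pvLoopB sStr.toList.dropLast 0 []).getD 0 (-1) := by
      rw [harith, hxs, pvLoopA_eq_stack sStr.toList xs.length hkle 1 le_rfl, htk]
      norm_num
    rw [hmain]
    cases hst : pvLoopB sStr.toList.dropLast 0 [] with
    | nil => norm_num
    | cons iPos t =>
        simp only [List.getD_cons_zero]
        by_cases hip : iPos > 0
        · rw [if_pos hip, if_pos hip]
          rw [PySem.List.slice_zero_start, slice_len_sub_one sStr.toList (iPos + 1) hl]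
        · rw [if_neg hip, if_neg hip]
  · have hendF : PySem.Str.endswith sStr "}" = false := by
      rcases Bool.eq_false_or_eq_true (PySem.Str.endswith sStr "}") with h | h
      · exact absurd (hend.mp h) hc
      · exact h
    simp only [hc, hendF, Bool.false_eq_true, if_false]
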